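-- pv_equiv track=rewrite | github.com/serghi127/what2eat | scraper.py | _estimate_macros_fallback
-- ===== SOURCE A (Python) =====
-- def _estimate_macros_fallback(ingredients, servings):
--     """Fallback method for macro estimation"""
--
--     total_calories = 0
--     total_protein = 0
--     total_carbs = 0
--     total_fat = 0
--     total_sugar = 0
--     total_cholesterol = 0
--     total_fiber = 0
--
--     for ingredient in ingredients:
--         ingredient_lower = ingredient.lower()
--
--         # High calorie ingredients
--         if any(word in ingredient_lower for word in ['oil', 'butter', 'cream', 'cheese']):
--             total_calories += 120
--             total_fat += 12
--             total_cholesterol += 15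
--         elif any(word in ingredient_lower for word in ['pasta', 'rice', 'bread', 'flour']):
--             total_calories += 80
--             total_carbs += 18
--             total_fiber += 2
--         elif any(word in ingredient_lower for word in ['meat', 'chicken', 'beef', 'pork', 'fish']):
--             total_calories += 100
--             total_protein += 20
--             total_cholesterol += 25
--         elif any(word in ingredient_lower for word in ['sugar', 'honey', 'syrup', 'jam']):
--             total_calories += 60
--             total_sugar += 15
--         elif any(word in ingredient_lower for word in ['vegetable', 'onion', 'garlic', 'herb']):
--             total_calories += 15
--             total_carbs += 3
--             total_fiber += 2
--         elif any(word in ingredient_lower for word in ['fruit', 'berry', 'apple', 'banana']):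
--             total_calories += 30
--             total_carbs += 8
--             total_fiber += 3
--         elif any(word in ingredient_lower for word in ['bean', 'lentil', 'chickpea', 'legume']):
--             total_calories += 50
--             total_protein += 8
--             total_carbs += 12
--             total_fiber += 6
--         elif any(word in ingredient_lower for word in ['egg']):
--             total_calories += 70
--             total_protein += 6
--             total_fat += 5
--             total_cholesterol += 185
--         else:
--             total_calories += 40
--             total_protein += 2
--             total_carbs += 5
--             total_fat += 1
--             total_fiber += 1
--
--     # Calculate per serving
--     return {
--         'calories': max(total_calories // servings, 100),
--         'protein': max(total_protein // servings, 5),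
--         'carbs': max(total_carbs // servings, 5),
--         'fat': max(total_fat // servings, 2),
--         'sugar': max(total_sugar // servings, 0),
--         'cholesterol': max(total_cholesterol // servings, 0),
--         'fiber': max(total_fiber // servings, 1)
--     }
-- ===== SOURCE B (Python) =====
-- # Category-major staged passes: instead of classifying each ingredient through a
-- # branch cascade, B sieves the lowered ingredient list through the ordered
-- # categories, peeling off the matches of each category in turn and adding
-- # count * delta per category; the unmatched remainder gets the default weights.
-- _CATEGORIES = [
--     (['oil', 'butter', 'cream', 'cheese'],        (120, 0, 0, 12, 0, 15, 0)),
--     (['pasta', 'rice', 'bread', 'flour'],         (80, 0, 18, 0, 0, 0, 2)),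
--     (['meat', 'chicken', 'beef', 'pork', 'fish'], (100, 20, 0, 0, 0, 25, 0)),
--     (['sugar', 'honey', 'syrup', 'jam'],          (60, 0, 0, 0, 15, 0, 0)),
--     (['vegetable', 'onion', 'garlic', 'herb'],    (15, 0, 3, 0, 0, 0, 2)),
--     (['fruit', 'berry', 'apple', 'banana'],       (30, 0, 8, 0, 0, 0, 3)),
--     (['bean', 'lentil', 'chickpea', 'legume'],    (50, 8, 12, 0, 0, 0, 6)),
--     (['egg'],                                     (70, 6, 0, 5, 0, 185, 0)),
-- ]
-- _DEFAULT = (40, 2, 5, 1, 0, 0, 1)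
--
--
-- def _estimate_macros_fallback(ingredients, servings):
--     remaining = [ing.lower() for ing in ingredients]
--     totals = [0, 0, 0, 0, 0, 0, 0]
--     for keywords, deltas in _CATEGORIES:
--         matched = [s for s in remaining if any(w in s for w in keywords)]
--         remaining = [s for s in remaining if not any(w in s for w in keywords)]
--         for j in range(7):
--             totals[j] += len(matched) * deltas[j]
--     for j in range(7):
--         totals[j] += len(remaining) * _DEFAULT[j]
--     cal, pro, carbs, fat, sug, chol, fib = totals
--     return {
--         'calories': max(cal // servings, 100),
--         'protein': max(pro // servings, 5),
--         'carbs': max(carbs // servings, 5),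
--         'fat': max(fat // servings, 2),
--         'sugar': max(sug // servings, 0),
--         'cholesterol': max(chol // servings, 0),
--         'fiber': max(fib // servings, 1),
--     }
-- ===== Notes on version B (the rewrite author's own statement) =====
-- stated objective: alternative
-- what changed: Replaces A's ingredient-major if/elif dispatch (one branch cascade per ingredient, seven scalar accumulators) by a category-major sieve: B repeatedly partitions the lowered ingredient list by each category in order, adds len(matched) * delta per category at once, and charges the unmatched remainder with the default weights; correctness rests on first-match semantics equaling sequential set subtraction plus commutativity of the additions.
import Mathlib
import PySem

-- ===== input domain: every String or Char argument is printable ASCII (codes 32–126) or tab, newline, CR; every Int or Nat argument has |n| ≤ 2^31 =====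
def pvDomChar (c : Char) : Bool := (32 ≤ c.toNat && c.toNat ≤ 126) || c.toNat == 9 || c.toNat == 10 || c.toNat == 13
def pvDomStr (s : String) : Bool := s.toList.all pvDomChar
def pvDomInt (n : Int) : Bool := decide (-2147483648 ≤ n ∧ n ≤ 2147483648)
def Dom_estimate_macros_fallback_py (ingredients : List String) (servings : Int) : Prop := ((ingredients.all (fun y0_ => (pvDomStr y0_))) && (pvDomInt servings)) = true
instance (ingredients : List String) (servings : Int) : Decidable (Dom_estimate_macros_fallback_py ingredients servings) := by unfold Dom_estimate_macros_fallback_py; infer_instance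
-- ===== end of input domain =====

-- B replaces A's per-ingredient if/elif dispatch by category-major staged passes:
-- it sieves the lowered list through the ordered categories, adding count * delta
-- per category and charging the remainder with the default weights (objective: alternative).

-- ===== PORT A =====
-- the body of A's for-loop: the if/elif cascade updating the seven running totals
def pvStepA (st : Int × Int × Int × Int × Int × Int × Int) (ingredient : String) :
    Int × Int × Int × Int × Int × Int × Int :=
  let low := PySem.Str.lower ingredient
  let (c, p, cb, f, s, ch, fi) := st
  if (["oil", "butter", "cream", "cheese"].any fun w => PySem.Str.isIn w low) then
    (c + 120, p, cb, f + 12, s, ch + 15, fi)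
  else if (["pasta", "rice", "bread", "flour"].any fun w => PySem.Str.isIn w low) then
    (c + 80, p, cb + 18, f, s, ch, fi + 2)
  else if (["meat", "chicken", "beef", "pork", "fish"].any fun w => PySem.Str.isIn w low) then
    (c + 100, p + 20, cb, f, s, ch + 25, fi)
  else if (["sugar", "honey", "syrup", "jam"].any fun w => PySem.Str.isIn w low) then
    (c + 60, p, cb, f, s + 15, ch, fi)
  else if (["vegetable", "onion", "garlic", "herb"].any fun w => PySem.Str.isIn w low) then
    (c + 15, p, cb + 3, f, s, ch, fi + 2)
  else if (["fruit", "berry", "apple", "banana"].any fun w => PySem.Str.isIn w low) then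
    (c + 30, p, cb + 8, f, s, ch, fi + 3)
  else if (["bean", "lentil", "chickpea", "legume"].any fun w => PySem.Str.isIn w low) then
    (c + 50, p + 8, cb + 12, f, s, ch, fi + 6)
  else if (["egg"].any fun w => PySem.Str.isIn w low) then
    (c + 70, p + 6, cb, f + 5, s, ch + 185, fi)
  else
    (c + 40, p + 2, cb + 5, f + 1, s, ch, fi + 1)

def estimate_macros_fallback_py (ingredients : List String) (servings : Int) : List (String × Int) :=
  let totals := ingredients.foldl pvStepA (0, 0, 0, 0, 0, 0, 0)
  let (c, p, cb, f, s, ch, fi) := totals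
  [("calories", max (PySem.Int.floordiv c servings) 100),
   ("protein", max (PySem.Int.floordiv p servings) 5),
   ("carbs", max (PySem.Int.floordiv cb servings) 5),
   ("fat", max (PySem.Int.floordiv f servings) 2),
   ("sugar", max (PySem.Int.floordiv s servings) 0),
   ("cholesterol", max (PySem.Int.floordiv ch servings) 0),
   ("fiber", max (PySem.Int.floordiv fi servings) 1)]

-- ===== PORT B =====
def pvCategories : List (List String × (Int × Int × Int × Int × Int × Int × Int)) :=
  [(["oil", "butter", "cream", "cheese"], (120, 0, 0, 12, 0, 15, 0)),
   (["pasta", "rice", "bread", "flour"], (80, 0, 18, 0, 0, 0, 2)),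
   (["meat", "chicken", "beef", "pork", "fish"], (100, 20, 0, 0, 0, 25, 0)),
   (["sugar", "honey", "syrup", "jam"], (60, 0, 0, 0, 15, 0, 0)),
   (["vegetable", "onion", "garlic", "herb"], (15, 0, 3, 0, 0, 0, 2)),
   (["fruit", "berry", "apple", "banana"], (30, 0, 8, 0, 0, 0, 3)),
   (["bean", "lentil", "chickpea", "legume"], (50, 8, 12, 0, 0, 0, 6)),
   (["egg"], (70, 6, 0, 5, 0, 185, 0))]

def pvDefault : Int × Int × Int × Int × Int × Int × Int := (40, 2, 5, 1, 0, 0, 1)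

-- any(w in s for w in keywords)
def pvMatch (kws : List String) (s : String) : Bool := kws.any fun w => PySem.Str.isIn w s

-- totals[j] += n * deltas[j] for all seven j
def pvAddScaled (t : Int × Int × Int × Int × Int × Int × Int) (n : Nat)
    (d : Int × Int × Int × Int × Int × Int × Int) : Int × Int × Int × Int × Int × Int × Int :=
  (t.1 + n * d.1, t.2.1 + n * d.2.1, t.2.2.1 + n * d.2.2.1, t.2.2.2.1 + n * d.2.2.2.1,
   t.2.2.2.2.1 + n * d.2.2.2.2.1, t.2.2.2.2.2.1 + n * d.2.2.2.2.2.1, t.2.2.2.2.2.2 + n * d.2.2.2.2.2.2)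

-- one sieve stage: peel off this category's matches, add count * delta
def pvStageB (st : List String × (Int × Int × Int × Int × Int × Int × Int))
    (kd : List String × (Int × Int × Int × Int × Int × Int × Int)) :
    List String × (Int × Int × Int × Int × Int × Int × Int) :=
  let matched := st.1.filter (fun s => pvMatch kd.1 s)
  let remaining := st.1.filter (fun s => !pvMatch kd.1 s)
  (remaining, pvAddScaled st.2 matched.length kd.2)

def estimate_macros_fallback_py_alt (ingredients : List String) (servings : Int) : List (String × Int) :=
  let st := pvCategories.foldl pvStageB (ingredients.map PySem.Str.lower, (0, 0, 0, 0, 0, 0, 0))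
  let totals := pvAddScaled st.2 st.1.length pvDefault
  let (c, p, cb, f, s, ch, fi) := totals
  [("calories", max (PySem.Int.floordiv c servings) 100),
   ("protein", max (PySem.Int.floordiv p servings) 5),
   ("carbs", max (PySem.Int.floordiv cb servings) 5),
   ("fat", max (PySem.Int.floordiv f servings) 2),
   ("sugar", max (PySem.Int.floordiv s servings) 0),
   ("cholesterol", max (PySem.Int.floordiv ch servings) 0),
   ("fiber", max (PySem.Int.floordiv fi servings) 1)]

-- ===== PRECONDITION & SPEC =====
-- Pre_ excludes servings = 0, on which A raises ZeroDivisionError.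
def Pre_estimate_macros_fallback_py (ingredients : List String) (servings : Int) : Prop := servings ≠ 0
instance (ingredients : List String) (servings : Int) : Decidable (Pre_estimate_macros_fallback_py ingredients servings) := by unfold Pre_estimate_macros_fallback_py; infer_instance

def pvWitness_estimate_macros_fallback_py : List String × Int := (["olive oil", "rice"], 2)

def Spec_estimate_macros_fallback_py (ingredients : List String) (servings : Int) (out : List (String × Int)) : Prop := out = estimate_macros_fallback_py_alt ingredients servings
instance (ingredients : List String) (servings : Int) (out : List (String × Int)) : Decidable (Spec_estimate_macros_fallback_py ingredients servings out) := by unfold Spec_estimate_macros_fallback_py; infer_instance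

-- ===== CLAIM (what is proved, stated in full; the proofs are below) =====
def Claim_equal_estimate_macros_fallback_py : Prop := ∀ (ingredients : List String) (servings : Int), Dom_estimate_macros_fallback_py ingredients servings → Pre_estimate_macros_fallback_py ingredients servings → Spec_estimate_macros_fallback_py ingredients servings (estimate_macros_fallback_py ingredients servings)

-- ===== LEMMAS AND PROOFS =====
-- proof-side vector algebra
def pvAdd (a b : Int × Int × Int × Int × Int × Int × Int) : Int × Int × Int × Int × Int × Int × Int :=
  (a.1 + b.1, a.2.1 + b.2.1, a.2.2.1 + b.2.2.1, a.2.2.2.1 + b.2.2.2.1,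
   a.2.2.2.2.1 + b.2.2.2.2.1, a.2.2.2.2.2.1 + b.2.2.2.2.2.1, a.2.2.2.2.2.2 + b.2.2.2.2.2.2)

def pvSum : List (Int × Int × Int × Int × Int × Int × Int) → Int × Int × Int × Int × Int × Int × Int
  | [] => (0, 0, 0, 0, 0, 0, 0)
  | v :: vs => pvAdd v (pvSum vs)

-- first-match classification, for the proof only
def pvFirstMatch : List (List String × (Int × Int × Int × Int × Int × Int × Int)) → String →
    Int × Int × Int × Int × Int × Int × Int
  | [], _ => pvDefault
  | (kws, d) :: rest, low => if pvMatch kws low then d else pvFirstMatch rest low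

theorem pvAdd_zero (a : Int × Int × Int × Int × Int × Int × Int) : pvAdd a (0, 0, 0, 0, 0, 0, 0) = a := by
  obtain ⟨a1, a2, a3, a4, a5, a6, a7⟩ := a; simp [pvAdd]

theorem pvAdd_assoc (a b c : Int × Int × Int × Int × Int × Int × Int) :
    pvAdd (pvAdd a b) c = pvAdd a (pvAdd b c) := by
  simp only [pvAdd, Prod.mk.injEq]
  exact ⟨by ring, by ring, by ring, by ring, by ring, by ring, by ring⟩

theorem pvAdd_left_comm (a b c : Int × Int × Int × Int × Int × Int × Int) :
    pvAdd a (pvAdd b c) = pvAdd b (pvAdd a c) := by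
  simp only [pvAdd, Prod.mk.injEq]
  exact ⟨by ring, by ring, by ring, by ring, by ring, by ring, by ring⟩

theorem pvAddScaled_succ (t : Int × Int × Int × Int × Int × Int × Int) (n : Nat)
    (d : Int × Int × Int × Int × Int × Int × Int) :
    pvAddScaled t (n + 1) d = pvAdd d (pvAddScaled t n d) := by
  simp only [pvAddScaled, pvAdd, Prod.mk.injEq]
  refine ⟨?_, ?_, ?_, ?_, ?_, ?_, ?_⟩ <;> (push_cast; ring)

theorem pvAddScaled_eq (t : Int × Int × Int × Int × Int × Int × Int) (n : Nat)
    (d : Int × Int × Int × Int × Int × Int × Int) :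
    pvAddScaled t n d = pvAdd t (pvAddScaled (0, 0, 0, 0, 0, 0, 0) n d) := by
  simp only [pvAddScaled, pvAdd, Prod.mk.injEq]
  refine ⟨?_, ?_, ?_, ?_, ?_, ?_, ?_⟩ <;> ring

-- sum of a constant list = count * the constant
theorem pvSum_const (l : List String) (d : Int × Int × Int × Int × Int × Int × Int) :
    pvSum (l.map fun _ => d) = pvAddScaled (0, 0, 0, 0, 0, 0, 0) l.length d := by
  induction l with
  | nil => simp [pvSum, pvAddScaled]
  | cons h t ih => simp only [List.map_cons, pvSum, ih, List.length_cons, pvAddScaled_succ]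

-- splitting a sum of first-match values at the head category
theorem pvSum_split (l : List String) (p : String → Bool)
    (d : Int × Int × Int × Int × Int × Int × Int)
    (f : String → Int × Int × Int × Int × Int × Int × Int) :
    pvSum (l.map fun s => if p s then d else f s) =
      pvAdd (pvAddScaled (0, 0, 0, 0, 0, 0, 0) (l.filter p).length d)
            (pvSum ((l.filter fun s => !p s).map f)) := by
  induction l with
  | nil => simp [pvSum, pvAddScaled, pvAdd]
  | cons h t ih =>
    by_cases hp : p h
    · simp only [List.map_cons, pvSum, ih, List.filter_cons, hp, if_pos, Bool.not_true,
        Bool.false_eq_true, ite_false, ite_true, List.length_cons, pvAddScaled_succ, pvAdd_assoc]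
    · simp only [List.map_cons, pvSum, ih, List.filter_cons, hp, Bool.not_false,
        Bool.false_eq_true, ite_false, ite_true, pvAdd_left_comm]

-- the category-major sieve computes the sum of first-match classifications
theorem pvSieve_eq (cats : List (List String × (Int × Int × Int × Int × Int × Int × Int)))
    (lows : List String) (tot : Int × Int × Int × Int × Int × Int × Int) :
    pvAddScaled (cats.foldl pvStageB (lows, tot)).2 (cats.foldl pvStageB (lows, tot)).1.length pvDefault =
      pvAdd tot (pvSum (lows.map (pvFirstMatch cats))) := by
  induction cats generalizing lows tot with
  | nil =>
    simp only [List.foldl_nil]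
    rw [show lows.map (pvFirstMatch []) = lows.map (fun _ => pvDefault) from
          List.map_congr_left fun _ _ => rfl, pvSum_const, ← pvAddScaled_eq]
  | cons kd rest ih =>
    obtain ⟨kws, d⟩ := kd
    simp only [List.foldl_cons, pvStageB, ih, pvFirstMatch]
    rw [pvSum_split lows (pvMatch kws) d (pvFirstMatch rest),
        pvAddScaled_eq tot (List.length _) d, pvAdd_assoc]

-- A's cascade body is "add the first-match classification"
theorem pvStepA_eq (st : Int × Int × Int × Int × Int × Int × Int) (ing : String) :
    pvStepA st ing = pvAdd st (pvFirstMatch pvCategories (PySem.Str.lower ing)) := by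
  obtain ⟨c, p, cb, f, s, ch, fi⟩ := st
  simp only [pvStepA, pvCategories, pvFirstMatch, pvMatch, pvDefault]
  split_ifs <;> simp [pvAdd]

-- A's fold accumulates the same sum
theorem pvFoldA_eq (l : List String) (st : Int × Int × Int × Int × Int × Int × Int) :
    l.foldl pvStepA st = pvAdd st (pvSum (l.map fun ing => pvFirstMatch pvCategories (PySem.Str.lower ing))) := by
  induction l generalizing st with
  | nil => simp [pvSum, pvAdd_zero]
  | cons h t ih =>
    simp only [List.foldl_cons, ih, pvStepA_eq, List.map_cons, pvSum, pvAdd_assoc]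

-- ===== VERDICT (by name: the statement is the Claim_ definition above) =====
theorem estimate_macros_fallback_py_spec : Claim_equal_estimate_macros_fallback_py := by
  intro ingredients servings _ _
  unfold Spec_estimate_macros_fallback_py
  simp only [estimate_macros_fallback_py, estimate_macros_fallback_py_alt, pvFoldA_eq, pvSieve_eq,
    List.map_map, Function.comp]
  rfl
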